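-- pv_equiv track=rewrite | github.com/PsychoPo/KURS_IStoSPP | calculating.py | rec3_sokol
-- ===== SOURCE A (Python) =====
-- from copy import deepcopy, copy
--
-- def rec3_sokol(matr):
--     r = []
--     diff = []
--
--     for i in range(len(matr[0])):
--         diff1 = 0
--         diff2 = 0
--         for j in range(len(matr)):
--             if j == 0:
--                 diff1 = matr[j][i]
--             elif j == len(matr) - 1:
--                 diff2 = matr[j][i]
--         diff3 = diff2 - diff1
--         diff.append(diff3)
--
--     diffcopy = deepcopy(diff)
--     diffcopy.sort()
--     diffcopy.reverse()
--
--     for k in diffcopy: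
--         for i in range(len(matr[0])):
--             diff1 = 0
--             diff2 = 0
--             for j in range(len(matr)):
--                 if j == 0:
--                     diff1 = matr[j][i]
--                 elif j == len(matr) - 1:
--                     diff2 = matr[j][i]
--             if diff2 - diff1 == k:
--                 r.append(i)
--
--     r = list(dict.fromkeys(r))
--
--     return r
-- ===== SOURCE B (Python) =====
-- def rec3_sokol(matr):
--     first = matr[0]
--     last = matr[-1]
--     diffs = [b - a for a, b in zip(first, last)]
--     return sorted(range(len(first)), key=lambda i: (-diffs[i], i))
-- ===== Notes on version B (the rewrite author's own statement) =====
-- stated objective: faster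
-- what changed: A recomputes each column's last-minus-first difference with a full row scan inside a doubly nested search over sorted diff values and then dedups; B computes each difference once and returns the indices sorted by the key (-diff, index), removing both inner scans.
-- intended difference: On single-row matrices whose row is not non-decreasing, A orders the indices by ascending cell value (its diff2 loop variable is never set, leaving diff = -matr[0][i]), while B returns the identity order 0..n-1 because last-first is 0 for every column, which is the intended meaning of a last-minus-first difference. — e.g. on rec3_sokol([[1, 0]]): A returns [1, 0], B returns [0, 1]
import Mathlib
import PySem

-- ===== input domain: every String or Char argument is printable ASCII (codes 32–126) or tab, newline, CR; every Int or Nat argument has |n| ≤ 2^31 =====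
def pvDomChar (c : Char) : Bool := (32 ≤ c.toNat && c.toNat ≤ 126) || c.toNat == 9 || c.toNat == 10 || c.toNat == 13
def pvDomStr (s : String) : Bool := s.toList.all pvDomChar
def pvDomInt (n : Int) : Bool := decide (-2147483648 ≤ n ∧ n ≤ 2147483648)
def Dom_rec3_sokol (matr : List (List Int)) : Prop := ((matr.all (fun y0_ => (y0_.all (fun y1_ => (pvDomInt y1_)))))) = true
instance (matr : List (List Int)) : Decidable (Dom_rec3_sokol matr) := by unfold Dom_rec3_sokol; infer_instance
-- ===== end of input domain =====

-- B computes each column's last-minus-first difference once and sorts the indices by (-diff, index)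
-- instead of A's repeated row scans inside a nested search over the sorted diff values (objective: faster).

-- ===== PORT A =====
-- A's inner j-loop (state (diff1, diff2)), written verbatim in two places of A; factored as a helper
def pvDiffAt (matr : List (List Int)) (i : Int) : Int :=
  let st := (PySem.List.pyRange 0 (PySem.List.len matr) 1).foldl
    (fun (p : Int × Int) j =>
      if j = 0 then (PySem.List.pyGetD (PySem.List.pyGetD matr j []) i 0, p.2)
      else if j = PySem.List.len matr - 1 then (p.1, PySem.List.pyGetD (PySem.List.pyGetD matr j []) i 0)
      else p) (0, 0)
  st.2 - st.1

def rec3_sokol (matr : List (List Int)) : List Int :=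
  let idx := PySem.List.pyRange 0 (PySem.List.len (PySem.List.pyGetD matr 0 [])) 1
  let diff := idx.map (fun i => pvDiffAt matr i)
  let diffcopy := (PySem.List.sorted diff (fun x => x) false).reverse
  let r := diffcopy.foldl (fun acc k =>
    idx.foldl (fun acc2 i => if pvDiffAt matr i = k then acc2 ++ [i] else acc2) acc) []
  PySem.List.dedup r

-- ===== PORT B =====
def rec3_sokol_alt (matr : List (List Int)) : List Int :=
  let first := PySem.List.pyGetD matr 0 []
  let last := PySem.List.pyGetD matr (-1) []
  let diffs := (first.zip last).map (fun ab => ab.2 - ab.1)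
  PySem.List.sorted2 (PySem.List.pyRange 0 (PySem.List.len first) 1)
    (fun i => -(PySem.List.pyGetD diffs i 0)) (fun i => i) false

-- ===== PRECONDITION & SPEC =====
-- Pre_ excludes exactly the inputs on which A raises IndexError: an empty matrix, or a matrix
-- whose last row is shorter than its first row.
def Pre_rec3_sokol (matr : List (List Int)) : Prop :=
  matr ≠ [] ∧ (PySem.List.pyGetD matr 0 []).length ≤ (PySem.List.pyGetD matr (-1) []).length
instance (matr : List (List Int)) : Decidable (Pre_rec3_sokol matr) := by
  unfold Pre_rec3_sokol; infer_instance
def pvWitness_rec3_sokol : List (List Int) := [[0], [1]]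

-- On single-row matrices whose row is not non-decreasing, A returns the indices ordered by ascending
-- cell value (its diff2 variable is never set, leaving diff = -matr[0][i]), while B returns the identity
-- order 0..n-1, the intended value since last-minus-first is 0 for every column.
def D_rec3_sokol (matr : List (List Int)) : Prop :=
  matr.length = 1 ∧ ¬ (PySem.List.pyGetD matr 0 []).Pairwise (· ≤ ·)
instance (matr : List (List Int)) : Decidable (D_rec3_sokol matr) := by
  unfold D_rec3_sokol; infer_instance

def Spec_rec3_sokol (matr : List (List Int)) (out : List Int) : Prop :=
  ¬ D_rec3_sokol matr → out = rec3_sokol_alt matr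
instance (matr : List (List Int)) (out : List Int) : Decidable (Spec_rec3_sokol matr out) := by
  unfold Spec_rec3_sokol; infer_instance

def pvDiffWitness_rec3_sokol : List (List Int) := [[1, 0]]
def pvDiffWitnessOut_rec3_sokol : (List Int) × (List Int) := ([1, 0], [0, 1])

-- ===== CLAIM (what is proved, stated in full; the proofs are below) =====
def Claim_unchanged_rec3_sokol : Prop := ∀ (matr : List (List Int)), Dom_rec3_sokol matr → Pre_rec3_sokol matr → Spec_rec3_sokol matr (rec3_sokol matr)
def Claim_changed_rec3_sokol : Prop := Dom_rec3_sokol (pvDiffWitness_rec3_sokol) ∧ Pre_rec3_sokol (pvDiffWitness_rec3_sokol) ∧ D_rec3_sokol (pvDiffWitness_rec3_sokol) ∧ rec3_sokol (pvDiffWitness_rec3_sokol) = pvDiffWitnessOut_rec3_sokol.1 ∧ rec3_sokol_alt (pvDiffWitness_rec3_sokol) = pvDiffWitnessOut_rec3_sokol.2 ∧ pvDiffWitnessOut_rec3_sokol.1 ≠ pvDiffWitnessOut_rec3_sokol.2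
def Claim_exact_rec3_sokol : Prop := ∀ (matr : List (List Int)), Dom_rec3_sokol matr → Pre_rec3_sokol matr → D_rec3_sokol matr → rec3_sokol matr ≠ rec3_sokol_alt matr

-- ===== LEMMAS AND PROOFS =====

-- the column indices whose diff equals k, in index order
def pvBlock (d : Int → Int) (xs : List Int) (k : Int) : List Int :=
  xs.filter (fun i => decide (d i = k))

-- the keys of S whose block is not yet inside the accumulated set s; first occurrences, in order
def pvNewKeys (d : Int → Int) (xs : List Int) : List Int → List Int → List Int
  | _, [] => []
  | s, k :: t =>
    if ∃ i ∈ pvBlock d xs k, i ∈ s then pvNewKeys d xs s t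
    else k :: pvNewKeys d xs (s ++ pvBlock d xs k) t

-- the column-index list A iterates over, and the order its output satisfies
def pvXs (matr : List (List Int)) : List Int :=
  PySem.List.pyRange 0 (PySem.List.len (PySem.List.pyGetD matr 0 [])) 1
def pvP (matr : List (List Int)) (a b : Int) : Prop :=
  pvDiffAt matr b < pvDiffAt matr a ∨ (pvDiffAt matr a = pvDiffAt matr b ∧ a < b)

theorem pvFoldAdd_old (b s : List Int) (h : ∀ i ∈ b, i ∈ s) :
    b.foldl PySem.Set.add s = s := by
  induction b generalizing s with
  | nil => rfl
  | cons x t ih =>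
    simp only [List.foldl_cons]
    rw [PySem.Set.add_of_mem (h x (by simp))]
    exact ih s (fun i hi => h i (by simp [hi]))

theorem pvFoldAdd_new (b s : List Int) (hnd : b.Nodup) (h : ∀ i ∈ b, i ∉ s) :
    b.foldl PySem.Set.add s = s ++ b := by
  induction b generalizing s with
  | nil => simp
  | cons x t ih =>
    simp only [List.foldl_cons]
    rw [PySem.Set.add_of_not_mem (h x (by simp))]
    rw [ih (s ++ [x]) hnd.of_cons]
    · simp
    · intro i hi
      simp only [List.mem_append, List.mem_singleton]
      rintro (his | rfl)
      · exact h i (by simp [hi]) his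
      · exact (List.nodup_cons.1 hnd).1 hi

-- saturation: s is a subset of xs closed under "same diff value"
def pvSat (d : Int → Int) (xs s : List Int) : Prop :=
  ∀ i ∈ s, i ∈ xs ∧ ∀ j ∈ xs, d j = d i → j ∈ s

theorem pvNewKeys_sublist (d : Int → Int) (xs : List Int) :
    ∀ (S s : List Int), (pvNewKeys d xs s S).Sublist S := by
  intro S
  induction S with
  | nil => intro s; simp [pvNewKeys]
  | cons k t ih =>
    intro s
    rw [pvNewKeys]
    split_ifs with h
    · exact (ih s).cons k
    · exact (ih _).cons₂ k

theorem pvNewKeys_nodup (d : Int → Int) (xs : List Int) :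
    ∀ (S s : List Int), (∀ k ∈ S, pvBlock d xs k ≠ []) →
      (pvNewKeys d xs s S).Nodup ∧
      ∀ k ∈ pvNewKeys d xs s S, ∀ i ∈ pvBlock d xs k, i ∉ s := by
  intro S
  induction S with
  | nil => intro s _; simp [pvNewKeys]
  | cons k0 t ih =>
    intro s hne
    have hnet : ∀ k ∈ t, pvBlock d xs k ≠ [] := fun k hk => hne k (by simp [hk])
    rw [pvNewKeys]
    split_ifs with h
    · exact ih s hnet
    · obtain ⟨ihnd, ihfresh⟩ := ih (s ++ pvBlock d xs k0) hnet
      constructor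
      · refine List.nodup_cons.2 ⟨?_, ihnd⟩
        intro hmem
        obtain ⟨i, hib⟩ := List.exists_mem_of_ne_nil _ (hne k0 (by simp))
        exact ihfresh k0 hmem i hib (by simp [hib])
      · intro k hk i hib his
        rcases List.mem_cons.1 hk with rfl | hkt
        · exact h ⟨i, hib, his⟩
        · exact ihfresh k hkt i hib (by simp [his])

theorem pvG (d : Int → Int) (xs : List Int) (hxs : xs.Nodup) :
    ∀ (S s : List Int), pvSat d xs s → s.Nodup →
      (S.flatMap (pvBlock d xs)).foldl PySem.Set.add s
        = s ++ (pvNewKeys d xs s S).flatMap (pvBlock d xs) := by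
  intro S
  induction S with
  | nil => intro s _ _; simp [pvNewKeys]
  | cons k0 t ih =>
    intro s hsat hnd
    rw [pvNewKeys, List.flatMap_cons, List.foldl_append]
    split_ifs with h
    · obtain ⟨i0, hi0b, hi0s⟩ := h
      have hall : ∀ i ∈ pvBlock d xs k0, i ∈ s := by
        intro i hib
        have h1 : d i = k0 := by simpa [pvBlock] using (List.mem_filter.1 hib).2
        have h2 : d i0 = k0 := by simpa [pvBlock] using (List.mem_filter.1 hi0b).2
        exact ((hsat i0 hi0s).2 i (List.mem_filter.1 hib).1 (by rw [h1, h2]))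
      rw [pvFoldAdd_old _ _ hall]
      exact ih s hsat hnd
    · push Not at h
      have hbnd : (pvBlock d xs k0).Nodup := hxs.filter _
      rw [pvFoldAdd_new _ _ hbnd h]
      have hsat' : pvSat d xs (s ++ pvBlock d xs k0) := by
        intro i hi
        rcases List.mem_append.1 hi with his | hib
        · obtain ⟨hx, hcl⟩ := hsat i his
          exact ⟨hx, fun j hj hdj => List.mem_append.2 (Or.inl (hcl j hj hdj))⟩
        · refine ⟨(List.mem_filter.1 hib).1, ?_⟩
          intro j hj hdj
          refine List.mem_append.2 (Or.inr ?_)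
          have h1 : d i = k0 := by simpa [pvBlock] using (List.mem_filter.1 hib).2
          exact List.mem_filter.2 ⟨hj, by simp [hdj, h1]⟩
      have hnd' : (s ++ pvBlock d xs k0).Nodup :=
        List.Nodup.append hnd hbnd (List.disjoint_right.2 h)
      rw [ih _ hsat' hnd']
      simp [List.flatMap_cons]

theorem pvR_eq (d : Int → Int) (xs S : List Int) :
    S.foldl (fun acc k => xs.foldl (fun acc2 i => if d i = k then acc2 ++ [i] else acc2) acc) []
      = S.flatMap (pvBlock d xs) := by
  have hinner : ∀ (acc : List Int), ∀ k ∈ S,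
      xs.foldl (fun acc2 i => if d i = k then acc2 ++ [i] else acc2) acc
        = acc ++ pvBlock d xs k := by
    intro acc k _
    have := PySem.List.foldl_append_if (fun i => decide (d i = k)) id xs acc
    simpa [pvBlock] using this
  rw [PySem.List.foldl_congr_mem S _ (fun acc k => acc ++ pvBlock d xs k) [] hinner]
  rw [PySem.List.foldl_append_eq_flatMap]
  simp

theorem pvOut_eq (d : Int → Int) (xs : List Int) (hxs : xs.Nodup) (S : List Int) :
    PySem.List.dedup (S.flatMap (pvBlock d xs))
      = (pvNewKeys d xs [] S).flatMap (pvBlock d xs) := by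
  rw [PySem.List.dedup_eq_ofList]
  show List.foldl PySem.Set.add PySem.Set.empty _ = _
  have h := pvG d xs hxs S [] (by intro i hi; simp at hi) List.nodup_nil
  simpa [PySem.Set.empty_eq] using h

theorem pvOut_perm (d : Int → Int) (xs S : List Int) (hxsnd : xs.Nodup)
    (hSmem : ∀ i ∈ xs, d i ∈ S) :
    (PySem.List.dedup (S.flatMap (pvBlock d xs))).Perm xs := by
  apply List.perm_of_nodup_nodup_toFinset_eq (PySem.List.nodup_dedup _) hxsnd
  ext a
  simp only [List.mem_toFinset, PySem.List.mem_dedup, List.mem_flatMap]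
  constructor
  · rintro ⟨k, _, hab⟩
    exact (List.mem_filter.1 hab).1
  · intro ha
    exact ⟨d a, hSmem a ha, List.mem_filter.2 ⟨ha, by simp⟩⟩

theorem pvOut_pairwise (d : Int → Int) (xs S : List Int) (hxslt : xs.Pairwise (· < ·))
    (hSdesc : S.Pairwise (fun a b => b ≤ a)) (hne : ∀ k ∈ S, pvBlock d xs k ≠ []) :
    ((pvNewKeys d xs [] S).flatMap (pvBlock d xs)).Pairwise
      (fun a b => d b < d a ∨ (d a = d b ∧ a < b)) := by
  obtain ⟨hKnd, -⟩ := pvNewKeys_nodup d xs S [] hne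
  have hKdesc : (pvNewKeys d xs [] S).Pairwise (fun a b => b ≤ a) :=
    List.Pairwise.sublist (pvNewKeys_sublist d xs S []) hSdesc
  have hKlt : (pvNewKeys d xs [] S).Pairwise (fun a b => b < a) := by
    refine (hKdesc.and hKnd).imp ?_
    rintro a b ⟨hle, hneq⟩
    exact lt_of_le_of_ne hle (fun hc => hneq hc.symm)
  rw [List.pairwise_flatMap]
  constructor
  · intro k _
    have hblt : (pvBlock d xs k).Pairwise (· < ·) :=
      List.Pairwise.sublist (List.filter_sublist (l := xs)) hxslt
    refine hblt.imp_of_mem ?_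
    intro a b ha hb hab
    have h1 : d a = k := by simpa [pvBlock] using (List.mem_filter.1 ha).2
    have h2 : d b = k := by simpa [pvBlock] using (List.mem_filter.1 hb).2
    exact Or.inr ⟨by rw [h1, h2], hab⟩
  · refine hKlt.imp ?_
    intro k1 k2 hlt x hx y hy
    have h1 : d x = k1 := by simpa [pvBlock] using (List.mem_filter.1 hx).2
    have h2 : d y = k2 := by simpa [pvBlock] using (List.mem_filter.1 hy).2
    exact Or.inl (by rw [h1, h2]; exact hlt)

theorem pvDiffAt_one (matr : List (List Int)) (i : Int) (h : matr.length = 1) :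
    pvDiffAt matr i = 0 - PySem.List.pyGetD (PySem.List.pyGetD matr 0 []) i 0 := by
  obtain ⟨a, rfl⟩ := List.length_eq_one_iff.1 h
  have h0 : PySem.List.pyRange 0 1 = [0] := by decide
  simp [pvDiffAt, h0]

theorem pvDiffAt_ge2 (matr : List (List Int)) (i : Int) (h2 : 2 ≤ matr.length) :
    pvDiffAt matr i = PySem.List.pyGetD (matr.getD (matr.length - 1) []) i 0
      - PySem.List.pyGetD (matr.getD 0 []) i 0 := by
  obtain ⟨q, hq⟩ : ∃ q, matr.length = q + 2 := ⟨matr.length - 2, by omega⟩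
  have hrange : PySem.List.pyRange 0 (PySem.List.len matr) 1
      = (List.map (fun k => ((k : Nat) : Int)) (0 :: List.map Nat.succ (List.range q)))
        ++ [(((q + 1 : Nat)) : Int)] := by
    rw [PySem.List.len_eq, show matr.length = q + 1 + 1 from by omega,
      PySem.List.pyRange_zero_natCast, List.range_succ, List.map_append]
    rw [List.range_succ_eq_map]
    simp
  have hmid : ∀ j ∈ List.map (fun k => ((k : Nat) : Int)) (List.map Nat.succ (List.range q)),
      ¬ j = 0 ∧ ¬ j = PySem.List.len matr - 1 := by
    intro j hj
    simp only [List.map_map, List.mem_map, List.mem_range, Function.comp] at hj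
    obtain ⟨k, hk, rfl⟩ := hj
    rw [PySem.List.len_eq]
    constructor <;> intro hc <;> simp [Nat.succ_eq_add_one] at hc <;> omega
  have hnoop : ∀ (l : List Int) (p : Int × Int),
      (∀ j ∈ l, ¬ j = 0 ∧ ¬ j = (PySem.List.len matr) - 1) →
      l.foldl (fun (p : Int × Int) j =>
        if j = 0 then (PySem.List.pyGetD (PySem.List.pyGetD matr j []) i 0, p.2)
        else if j = PySem.List.len matr - 1 then (p.1, PySem.List.pyGetD (PySem.List.pyGetD matr j []) i 0)
        else p) p = p := by
    intro l
    induction l with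
    | nil => intro p _; rfl
    | cons x t ih =>
      intro p hb
      simp only [List.foldl_cons]
      rw [if_neg (hb x (by simp)).1, if_neg (hb x (by simp)).2]
      exact ih p (fun j hj => hb j (by simp [hj]))
  rw [pvDiffAt]
  simp only [hrange, List.map_cons, Nat.cast_zero, List.cons_append, List.foldl_cons]
  simp only [if_true]
  rw [List.foldl_append, hnoop _ _ hmid, List.foldl_cons, List.foldl_nil]
  rw [if_neg (by push_cast; omega), if_pos (by rw [PySem.List.len_eq]; push_cast; omega)]
  rw [show matr.length - 1 = q + 1 from by omega]
  simp [PySem.List.pyGetD_zero, List.getD]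
  rw [show ((q : Int) + 1) = ((q + 1 : Nat) : Int) from by push_cast; ring,
    PySem.List.pyGetD_natCast]
  rfl

theorem pvSorted2_eq (xs : List Int) (k1 k2 : Int → Int) :
    PySem.List.sorted2 xs k1 k2 false
      = PySem.List.sorted xs (fun x => toLex (k1 x, k2 x)) false := by
  show List.foldl _ [] xs = List.foldl _ [] xs
  have hlt : (fun a b => decide (k1 a < k1 b) || (!decide (k1 b < k1 a) && decide (k2 a < k2 b)))
      = (fun a b : Int => decide ((toLex (k1 a, k2 a) : Lex (Int × Int)) < toLex (k1 b, k2 b))) := by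
    funext a b
    rcases lt_trichotomy (k1 a) (k1 b) with h | h | h
    · simp [h, Prod.Lex.toLex_lt_toLex]
    · simp [h, Prod.Lex.toLex_lt_toLex]
    · simp [Prod.Lex.toLex_lt_toLex, lt_asymm h, h.ne']
      intro hc
      exact absurd hc (not_le.2 h)
  rw [hlt]

theorem pvXs_eq (matr : List (List Int)) :
    pvXs matr = (List.range (PySem.List.pyGetD matr 0 []).length).map (fun k => ((k : Nat) : Int)) := by
  unfold pvXs
  rw [PySem.List.len_eq, PySem.List.pyRange_zero_natCast]

theorem pvXs_lt (matr : List (List Int)) : (pvXs matr).Pairwise (· < ·) := by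
  rw [pvXs_eq]
  refine List.Pairwise.map _ (fun a b (h : a < b) => ?_) (List.pairwise_lt_range)
  exact_mod_cast h

theorem pvXs_nodup (matr : List (List Int)) : (pvXs matr).Nodup :=
  (pvXs_lt matr).imp (fun h => ne_of_lt h)

theorem pvA_char (matr : List (List Int)) :
    (rec3_sokol matr).Perm (pvXs matr) ∧ (rec3_sokol matr).Pairwise (pvP matr) := by
  set d : Int → Int := fun i => pvDiffAt matr i with hd
  set S := (PySem.List.sorted ((pvXs matr).map d) (fun x => x) false).reverse with hSdef
  have hSmem : ∀ k, k ∈ S ↔ k ∈ (pvXs matr).map d := fun k => by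
    rw [hSdef, List.mem_reverse, PySem.List.mem_sorted]
  have hSdesc : S.Pairwise (fun a b => b ≤ a) := by
    rw [hSdef, List.pairwise_reverse]
    exact PySem.List.sorted_pairwise _ _
  have hne : ∀ k ∈ S, pvBlock d (pvXs matr) k ≠ [] := by
    intro k hk
    obtain ⟨i, hi, rfl⟩ := List.mem_map.1 ((hSmem k).1 hk)
    exact List.ne_nil_of_mem (List.mem_filter.2 ⟨hi, by simp⟩)
  have hrec : rec3_sokol matr = PySem.List.dedup (S.flatMap (pvBlock d (pvXs matr))) := by
    rw [show rec3_sokol matr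
        = PySem.List.dedup (S.foldl (fun acc k => (pvXs matr).foldl
            (fun acc2 i => if d i = k then acc2 ++ [i] else acc2) acc) []) from rfl]
    rw [pvR_eq]
  constructor
  · rw [hrec]
    exact pvOut_perm d (pvXs matr) S (pvXs_nodup matr)
      (fun i hi => (hSmem _).2 (List.mem_map_of_mem hi))
  · rw [hrec, pvOut_eq d (pvXs matr) (pvXs_nodup matr) S]
    exact pvOut_pairwise d (pvXs matr) S (pvXs_lt matr) hSdesc hne

-- B-side helper views (proof-side only)
def pvDiffs (matr : List (List Int)) : List Int :=
  ((PySem.List.pyGetD matr 0 []).zip (PySem.List.pyGetD matr (-1) [])).map (fun ab => ab.2 - ab.1)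
def pvKey (matr : List (List Int)) (i : Int) : Lex (Int × Int) :=
  toLex (-(PySem.List.pyGetD (pvDiffs matr) i 0), i)

theorem pvB_eq (matr : List (List Int)) :
    rec3_sokol_alt matr = PySem.List.sorted (pvXs matr) (pvKey matr) false := by
  rw [show rec3_sokol_alt matr = PySem.List.sorted2 (pvXs matr)
      (fun i => -(PySem.List.pyGetD (pvDiffs matr) i 0)) (fun i => i) false from rfl]
  rw [pvSorted2_eq]
  rfl

theorem pvXs_mem (matr : List (List Int)) :
    ∀ a ∈ pvXs matr, ∃ p : Nat, p < (PySem.List.pyGetD matr 0 []).length ∧ a = (p : Int) := by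
  intro a ha
  rw [pvXs_eq] at ha
  obtain ⟨p, hp, rfl⟩ := List.mem_map.1 ha
  exact ⟨p, List.mem_range.1 hp, rfl⟩

theorem pvDiffs_val (matr : List (List Int)) (hpre : Pre_rec3_sokol matr) :
    ∀ p : Nat, p < (PySem.List.pyGetD matr 0 []).length →
      PySem.List.pyGetD (pvDiffs matr) (p : Int) 0
        = (PySem.List.pyGetD matr (-1) []).getD p 0 - (PySem.List.pyGetD matr 0 []).getD p 0 := by
  intro p hp
  have hlen : (pvDiffs matr).length = (PySem.List.pyGetD matr 0 []).length := by
    rw [pvDiffs, List.length_map, List.length_zip]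
    exact Nat.min_eq_left hpre.2
  have hp2 : p < (PySem.List.pyGetD matr (-1) []).length := by
    have := hpre.2; omega
  rw [PySem.List.pyGetD_natCast, List.getD_eq_getElem _ _ (by omega),
    List.getD_eq_getElem _ _ hp, List.getD_eq_getElem _ _ hp2]
  simp [pvDiffs, List.getElem_zip]

theorem pvLast_eq (matr : List (List Int)) (h2 : 2 ≤ matr.length) :
    PySem.List.pyGetD matr (-1) [] = matr.getD (matr.length - 1) [] := by
  have hne : matr ≠ [] := by intro hc; rw [hc] at h2; simp at h2
  rw [PySem.List.pyGetD_neg_one matr [] hne, List.getLast_eq_getElem,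
    List.getD_eq_getElem _ _ (by omega)]

theorem pvDval_ge2 (matr : List (List Int)) (hpre : Pre_rec3_sokol matr) (h2 : 2 ≤ matr.length) :
    ∀ p : Nat, p < (PySem.List.pyGetD matr 0 []).length →
      pvDiffAt matr (p : Int) = PySem.List.pyGetD (pvDiffs matr) (p : Int) 0 := by
  intro p hp
  rw [pvDiffAt_ge2 matr _ h2, pvDiffs_val matr hpre p hp, pvLast_eq matr h2]
  rw [PySem.List.pyGetD_natCast, PySem.List.pyGetD_natCast]
  rw [show matr.getD 0 [] = PySem.List.pyGetD matr 0 [] from (PySem.List.pyGetD_zero matr []).symm]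

theorem pvFirst_last_one (matr : List (List Int)) (h1 : matr.length = 1) :
    PySem.List.pyGetD matr (-1) [] = PySem.List.pyGetD matr 0 [] := by
  obtain ⟨a, rfl⟩ := List.length_eq_one_iff.1 h1
  rw [PySem.List.pyGetD_neg_one [a] [] (by simp), PySem.List.pyGetD_zero]
  simp

theorem pvDiffs_zero_one (matr : List (List Int)) (h1 : matr.length = 1) :
    ∀ p : Nat, p < (PySem.List.pyGetD matr 0 []).length →
      PySem.List.pyGetD (pvDiffs matr) (p : Int) 0 = 0 := by
  intro p hp
  have hpre : Pre_rec3_sokol matr := by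
    constructor
    · intro hc; rw [hc] at h1; simp at h1
    · rw [pvFirst_last_one matr h1]
  rw [pvDiffs_val matr hpre p hp, pvFirst_last_one matr h1]
  ring

theorem pvDval_one (matr : List (List Int)) (h1 : matr.length = 1) (p : Nat) :
    pvDiffAt matr (p : Int) = -((PySem.List.pyGetD matr 0 []).getD p 0) := by
  rw [pvDiffAt_one matr _ h1, PySem.List.pyGetD_natCast]
  ring

theorem pvMono (l : List Int) (hs : l.Pairwise (· ≤ ·)) :
    ∀ p q : Nat, p ≤ q → q < l.length → l.getD p 0 ≤ l.getD q 0 := by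
  intro p q hpq hq
  rcases Nat.lt_or_ge p q with h | h
  · rw [List.getD_eq_getElem _ _ (by omega), List.getD_eq_getElem _ _ hq]
    exact List.pairwise_iff_getElem.1 hs p q (by omega) hq h
  · have : p = q := by omega
    rw [this]

theorem pvKey_mono (matr : List (List Int)) (hpre : Pre_rec3_sokol matr)
    (hnD : ¬ D_rec3_sokol matr) :
    ∀ a b, a ∈ pvXs matr → b ∈ pvXs matr → pvP matr a b → pvKey matr a < pvKey matr b := by
  intro a b ha hb hP
  obtain ⟨p, hp, rfl⟩ := pvXs_mem matr a ha
  obtain ⟨q, hq, rfl⟩ := pvXs_mem matr b hb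
  rcases Nat.lt_or_ge matr.length 2 with hm | hm
  · -- single row: diffs are all 0, A's order is by ascending cell value; ¬D_ gives a sorted row
    have h1 : matr.length = 1 := by
      have := List.length_pos_of_ne_nil hpre.1; omega
    have hsorted : (PySem.List.pyGetD matr 0 []).Pairwise (· ≤ ·) := by
      by_contra hns
      exact hnD ⟨h1, hns⟩
    have hlt : (p : Int) < (q : Int) := by
      rcases hP with hP | hP
      · rw [pvDval_one matr h1 p, pvDval_one matr h1 q] at hP
        have hval : (PySem.List.pyGetD matr 0 []).getD p 0 < (PySem.List.pyGetD matr 0 []).getD q 0 := by omega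
        by_contra hc
        have hqp : q ≤ p := by omega
        exact absurd (pvMono _ hsorted q p hqp hp) (by omega)
      · exact hP.2
    rw [pvKey, pvKey, Prod.Lex.toLex_lt_toLex]
    rw [pvDiffs_zero_one matr h1 p hp, pvDiffs_zero_one matr h1 q hq]
    exact Or.inr ⟨rfl, hlt⟩
  · -- at least two rows: diffs agree with A's diff values
    rw [pvKey, pvKey, Prod.Lex.toLex_lt_toLex]
    rw [← pvDval_ge2 matr hpre hm p hp, ← pvDval_ge2 matr hpre hm q hq]
    rcases hP with hP | hP
    · exact Or.inl (by omega)
    · exact Or.inr ⟨by rw [hP.1], hP.2⟩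

-- ===== VERDICT (by name: the statement is the Claim_ definition above) =====
theorem rec3_sokol_spec : Claim_unchanged_rec3_sokol := by
  intro matr _ hpre hnD
  obtain ⟨hperm, hpair⟩ := pvA_char matr
  have hpairκ : (rec3_sokol matr).Pairwise (fun a b => pvKey matr a < pvKey matr b) := by
    refine hpair.imp_of_mem ?_
    intro a b ha hb hP
    exact pvKey_mono matr hpre hnD a b (hperm.subset ha) (hperm.subset hb) hP
  have hsorted := PySem.List.sorted_eq_of_perm_of_pairwise_lt (pvXs matr) (rec3_sokol matr)
    (pvKey matr) hperm hpairκ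
  rw [pvB_eq matr, hsorted]

theorem rec3_sokol_changed : Claim_changed_rec3_sokol := by
  unfold Claim_changed_rec3_sokol; decide

theorem rec3_sokol_tight : Claim_exact_rec3_sokol := by
  intro matr _ hpre hD heq
  obtain ⟨h1, hns⟩ := hD
  -- B's output is the identity order 0..n-1
  have hxsκ : (pvXs matr).Pairwise (fun a b => pvKey matr a < pvKey matr b) := by
    refine (pvXs_lt matr).imp_of_mem ?_
    intro a b ha hb hab
    obtain ⟨p, hp, rfl⟩ := pvXs_mem matr a ha
    obtain ⟨q, hq, rfl⟩ := pvXs_mem matr b hb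
    rw [pvKey, pvKey, Prod.Lex.toLex_lt_toLex,
      pvDiffs_zero_one matr h1 p hp, pvDiffs_zero_one matr h1 q hq]
    exact Or.inr ⟨rfl, hab⟩
  have halt : rec3_sokol_alt matr = pvXs matr := by
    rw [pvB_eq matr]
    exact PySem.List.sorted_eq_of_perm_of_pairwise_lt _ _ _ (List.Perm.refl _) hxsκ
  -- if A's output were also the identity order, the row would be non-decreasing
  have hpair : (pvXs matr).Pairwise (pvP matr) := by
    rw [← halt, ← heq]
    exact (pvA_char matr).2
  refine hns ?_
  rw [List.pairwise_iff_getElem]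
  intro p q hp hq hpq
  have hxlen : (pvXs matr).length = (PySem.List.pyGetD matr 0 []).length := by
    rw [pvXs_eq, List.length_map, List.length_range]
  have hP := List.pairwise_iff_getElem.1 hpair p q (by omega) (by omega) hpq
  have hgp : (pvXs matr)[p]'(by omega) = (p : Int) := by
    simp [pvXs_eq]
  have hgq : (pvXs matr)[q]'(by omega) = (q : Int) := by
    simp [pvXs_eq]
  rw [hgp, hgq] at hP
  have hdp := pvDval_one matr h1 p
  have hdq := pvDval_one matr h1 q
  have hgoal : (PySem.List.pyGetD matr 0 []).getD p 0 ≤ (PySem.List.pyGetD matr 0 []).getD q 0 := by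
    rcases hP with hP | ⟨he, -⟩
    · rw [hdp, hdq] at hP
      omega
    · rw [hdp, hdq] at he
      omega
  rw [List.getD_eq_getElem _ _ hp, List.getD_eq_getElem _ _ hq] at hgoal
  exact hgoal
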